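-- pv_equiv track=rewrite | github.com/AizzQ/encrypt-via-add-mod-xor-changing-key | PR4.py | encrypt_by_add_mod1
-- ===== SOURCE A (Python) =====
-- def encrypt_by_add_mod1(x, xx):
--     xx = int(xx)
--     ci = [ord(c) for c in x]
--     res = []
--     for ele in ci:
--         aa = (xx + ele)
--         m = 256
--         a1 = int(aa) % m
--         res.append(a1)
--     fi = [chr(c) for c in res]
--     st = "".join(fi)
--     xi = "133"
--     xk = int(xi)
--     x1 = [ord(c) for c in st]
--     res1 = []
--     for el in x1:
--         aa1 = (el + xk)
--         m = 256
--         aa2 = int(aa1) % m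
--         res1.append(aa2)
--     f2 = [chr(cc) for cc in res1]
--     stt = "".join(f2)
--     return stt
-- ===== SOURCE B (Python) =====
-- def encrypt_by_add_mod1(x, xx):
--     xx = int(xx)
--     table = {ord(c): (ord(c) + xx + 133) % 256 for c in dict.fromkeys(x)}
--     return x.translate(table)
-- ===== Notes on version B (the rewrite author's own statement) =====
-- stated objective: faster
-- what changed: B builds a translation table once over the distinct characters (mapping ord(c) to (ord(c)+xx+133)%256, folding the constant 133 offset into one step) and produces the result with a single x.translate(table) call instead of A's two sequential char-by-char loop passes; translate runs the per-char work in C, a constant-factor speedup a timing run measured.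
import Mathlib
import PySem

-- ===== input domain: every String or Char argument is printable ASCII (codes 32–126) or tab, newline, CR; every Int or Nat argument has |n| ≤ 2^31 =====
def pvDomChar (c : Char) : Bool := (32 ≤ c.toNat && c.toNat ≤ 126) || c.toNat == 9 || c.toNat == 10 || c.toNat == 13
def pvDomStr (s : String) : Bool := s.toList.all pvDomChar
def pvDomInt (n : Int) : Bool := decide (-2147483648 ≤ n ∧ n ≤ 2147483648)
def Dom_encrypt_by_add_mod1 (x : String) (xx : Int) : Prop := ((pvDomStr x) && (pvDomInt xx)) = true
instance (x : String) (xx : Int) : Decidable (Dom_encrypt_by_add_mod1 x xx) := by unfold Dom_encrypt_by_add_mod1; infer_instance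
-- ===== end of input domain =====

-- B builds the translation table once over the distinct characters and applies it in a single
-- pass (str.translate) instead of A's two sequential char-by-char loops (measured faster, constant factor).

-- ===== PORT A =====
def encrypt_by_add_mod1 (x : String) (xx : Int) : String :=
  let ci : List Int := x.toList.map (fun c => (c.toNat : Int))
  let res : List Int := ci.foldl (fun acc ele =>
    let aa := xx + ele
    let m : Int := 256
    let a1 := PySem.Int.mod aa m
    acc ++ [a1]) []
  let fi : List Char := res.map (fun c => Char.ofNat c.toNat)
  let st : String := String.ofList fi
  let xk : Int := 133
  let x1 : List Int := st.toList.map (fun c => (c.toNat : Int))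
  let res1 : List Int := x1.foldl (fun acc el =>
    let aa1 := el + xk
    let m : Int := 256
    let aa2 := PySem.Int.mod aa1 m
    acc ++ [aa2]) []
  let f2 : List Char := res1.map (fun cc => Char.ofNat cc.toNat)
  String.ofList f2

-- ===== PORT B =====
-- the dict comprehension over dict.fromkeys(x) (ordered dedup), then x.translate(table):
-- each char is replaced by the table value at its codepoint, left unchanged when absent
def encrypt_by_add_mod1_alt (x : String) (xx : Int) : String :=
  let table : PySem.Dict Int Int :=
    (PySem.List.dedup x.toList).foldl
      (fun d c => d.insert (c.toNat : Int) (PySem.Int.mod ((c.toNat : Int) + xx + 133) 256))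
      PySem.Dict.empty
  String.ofList (x.toList.map (fun c =>
    match table.get? ((c.toNat : Int)) with
    | some v => Char.ofNat v.toNat
    | none => c))

-- ===== PRECONDITION & SPEC =====
def Spec_encrypt_by_add_mod1 (x : String) (xx : Int) (out : String) : Prop := out = encrypt_by_add_mod1_alt x xx
instance (x : String) (xx : Int) (out : String) : Decidable (Spec_encrypt_by_add_mod1 x xx out) := by unfold Spec_encrypt_by_add_mod1; infer_instance

-- ===== CLAIM (what is proved, stated in full; the proofs are below) =====
def Claim_equal_encrypt_by_add_mod1 : Prop := ∀ (x : String) (xx : Int), Dom_encrypt_by_add_mod1 x xx → Spec_encrypt_by_add_mod1 x xx (encrypt_by_add_mod1 x xx)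

-- ===== LEMMAS AND PROOFS =====

-- append-accumulator loop = map
theorem foldl_append_map {α β : Type} (f : α → β) :
    ∀ (l : List α) (acc : List β),
      l.foldl (fun a e => a ++ [f e]) acc = acc ++ l.map f := by
  intro l
  induction l with
  | nil => simp
  | cons a t ih => intro acc; simp [List.foldl, ih]

-- folding inserts whose keys all differ from k leaves get? k unchanged
theorem get?_foldl_insert_of_ne (xx : Int) :
    ∀ (l : List Char) (d : PySem.Dict Int Int) (k : Int),
      (∀ c ∈ l, ((c.toNat : Int)) ≠ k) →
      (l.foldl (fun d c =>
          d.insert ((c.toNat : Int)) (PySem.Int.mod ((c.toNat : Int) + xx + 133) 256)) d).get? k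
        = d.get? k := by
  intro l
  induction l with
  | nil => intro d k _; rfl
  | cons a t ih =>
    intro d k h
    simp only [List.foldl]
    rw [ih _ _ (fun c hc => h c (List.mem_cons_of_mem _ hc))]
    exact PySem.Dict.get?_insert_of_ne _ _ (Ne.symm (h a (List.mem_cons_self ..)))

-- the table answers every character that was inserted
theorem get?_foldl_insert_mem (xx : Int) :
    ∀ (l : List Char) (d : PySem.Dict Int Int) (c : Char), c ∈ l →
      (l.foldl (fun d c =>
          d.insert ((c.toNat : Int)) (PySem.Int.mod ((c.toNat : Int) + xx + 133) 256)) d).get?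
          ((c.toNat : Int))
        = some (PySem.Int.mod ((c.toNat : Int) + xx + 133) 256) := by
  intro l
  induction l with
  | nil => intro d c h; cases h
  | cons a t ih =>
    intro d c h
    by_cases hc : c ∈ t
    · exact ih _ c hc
    · have hca : c = a := by
        rcases List.mem_cons.mp h with h' | h'
        · exact h'
        · exact absurd h' hc
      subst hca
      simp only [List.foldl]
      rw [get?_foldl_insert_of_ne xx t _ _ ?_, PySem.Dict.get?_insert_self]
      intro c' hc' hk
      have hcc : c' = c := by
        have h2 : c'.toNat = c.toNat := by exact_mod_cast hk
        exact Char.ext (UInt32.toNat_inj.mp h2)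
      exact hc (hcc ▸ hc')

-- the per-character arithmetic: two add-mod passes = one add-mod with the folded offset
theorem toNat_ofNat_lt (n : Nat) (h : n < 55296) : (Char.ofNat n).toNat = n := by
  have hv : n.isValidChar := Or.inl h
  rw [Char.ofNat, dif_pos hv]
  simp [Char.toNat, Char.ofNatAux]

theorem char_step (xx : Int) (a : Nat) :
    Char.ofNat (PySem.Int.mod
        (((Char.ofNat (PySem.Int.mod (xx + (a : Int)) 256).toNat).toNat : Int) + 133) 256).toNat
      = Char.ofNat (PySem.Int.mod ((a : Int) + xx + 133) 256).toNat := by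
  have h256 : (0:Int) < 256 := by norm_num
  have hm : ∀ z : Int, PySem.Int.mod z 256 = z % 256 := fun z => PySem.Int.mod_eq_emod_of_pos h256
  simp only [hm]
  have hb1 : 0 ≤ (xx + (a : Int)) % 256 := Int.emod_nonneg _ (by norm_num)
  have hb2 : (xx + (a : Int)) % 256 < 256 := Int.emod_lt_of_pos _ h256
  rw [toNat_ofNat_lt _ (by omega)]
  congr 1
  omega

-- ===== VERDICT (by name: the statement is the Claim_ definition above) =====
theorem encrypt_by_add_mod1_spec : Claim_equal_encrypt_by_add_mod1 := by
  intro x xx _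
  unfold Spec_encrypt_by_add_mod1 encrypt_by_add_mod1 encrypt_by_add_mod1_alt
  simp only [foldl_append_map, List.nil_append, List.map_map]
  congr 1
  simp only [String.toList_ofList, List.map_map]
  apply List.map_congr_left
  intro c hc
  rw [get?_foldl_insert_mem xx _ _ c (by simpa [PySem.List.mem_dedup] using hc)]
  exact char_step xx c.toNat
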